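-- pv_equiv track=rewrite | github.com/deeptiGarg/interviewPrep | reorder log files.py | compare_2_lists
-- ===== SOURCE A (Python) =====
-- def compare_2_lists(a,b):
--     a = a.split(' ')
--     b = b.split(' ')
--     lenA = len(a)
--     lenB = len(b)
--     equal = 0
--     if lenA == lenB:
--         for i in range(1, lenA):
--             if a[i] > b[i]:
--                 equal = 1
--                 break
--             if a[i] < b[i]:
--                 equal = -1
--                 break
--         if equal == 0:
--             if(a[0] > b[0]):
--                 equal = 1
--             else:
--                 equal = -1
--
--     if lenA > lenB:
--         for i in range(1, lenB):
--             if a[i] > b[i]: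
--                 equal = 1
--                 break
--             if a[i] < b[i]:
--                 equal = -1
--                 break
--         if equal == 0:
--             equal = 1
--
--     if lenA < lenB:
--         for i in range(1, lenA):
--             if a[i] < b[i]:
--                 equal = -1
--                 break
--             if a[i] > b[i]:
--                 equal = 1
--                 break
--         if equal == 0:
--             equal = -1
--     return equal
-- ===== SOURCE B (Python) =====
-- def compare_2_lists(a, b):
--     a = a.split(' ')
--     b = b.split(' ')
--
--     def go(xs, ys, tie):
--         if not xs and not ys:
--             return tie
--         if not xs:
--             return -1
--         if not ys:
--             return 1
--         if xs[0] != ys[0]: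
--             return 1 if xs[0] > ys[0] else -1
--         return go(xs[1:], ys[1:], tie)
--
--     return go(a[1:], b[1:], 1 if a[0] > b[0] else -1)
-- ===== Notes on version B (the rewrite author's own statement) =====
-- stated objective: simpler
-- what changed: Replaces A's three length-cased index loops with a mutable flag by one simultaneous recursion over both word tails that never computes or compares lengths: exhaustion of either tail decides directly and the precomputed first-word tiebreaker is threaded as an accumulator.
import Mathlib
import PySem

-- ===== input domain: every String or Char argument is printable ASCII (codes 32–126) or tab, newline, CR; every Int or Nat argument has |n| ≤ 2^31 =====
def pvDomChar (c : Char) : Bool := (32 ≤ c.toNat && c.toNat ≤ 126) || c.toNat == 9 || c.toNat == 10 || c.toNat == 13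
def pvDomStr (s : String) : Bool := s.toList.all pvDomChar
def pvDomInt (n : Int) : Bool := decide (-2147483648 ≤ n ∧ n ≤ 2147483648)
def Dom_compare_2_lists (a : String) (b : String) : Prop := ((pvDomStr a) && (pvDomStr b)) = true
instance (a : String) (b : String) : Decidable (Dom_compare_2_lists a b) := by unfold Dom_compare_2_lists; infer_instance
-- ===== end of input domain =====

-- B replaces A's three length-cased index loops and mutable flag by one simultaneous
-- recursion over the two word tails with the first-word tiebreaker as accumulator (simpler).

-- ===== PORT A =====
-- A's loop 'for i in range(1,n): if a[i]>b[i]: equal=1;break; if a[i]<b[i]: equal=-1;break'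
-- walking the index-1 tails (the loop bound is the length of the shorter tail in every branch);
-- result 0 = the loop finished with equal still 0.
def pvScanGT : List String → List String → Int
  | x :: xs, y :: ys => if y < x then 1 else if x < y then -1 else pvScanGT xs ys
  | _, _ => 0

-- the third branch's loop tests '<' before '>'
def pvScanLT : List String → List String → Int
  | x :: xs, y :: ys => if x < y then -1 else if y < x then 1 else pvScanLT xs ys
  | _, _ => 0

-- the separator is the non-empty literal ' ', so split? is always some; headD only ever
-- reads the head of a non-empty split result (Python's a[0]).
def compare_2_lists (a : String) (b : String) : Int :=
  let A := (PySem.Str.split? a " ").getD []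
  let B := (PySem.Str.split? b " ").getD []
  let lenA := A.length
  let lenB := B.length
  if lenA = lenB then
    let equal := pvScanGT (A.drop 1) (B.drop 1)
    if equal = 0 then (if B.headD "" < A.headD "" then 1 else -1) else equal
  else if lenB < lenA then
    let equal := pvScanGT (A.drop 1) (B.drop 1)
    if equal = 0 then 1 else equal
  else
    let equal := pvScanLT (A.drop 1) (B.drop 1)
    if equal = 0 then -1 else equal

-- ===== PORT B =====
-- Source B's recursive helper 'go': simultaneous descent over both tails, tie threaded through
def pvGo : List String → List String → Int → Int
  | [], [], tie => tie
  | [], _ :: _, _ => -1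
  | _ :: _, [], _ => 1
  | x :: xs, y :: ys, tie => if x ≠ y then (if y < x then 1 else -1) else pvGo xs ys tie

def compare_2_lists_alt (a : String) (b : String) : Int :=
  let A := (PySem.Str.split? a " ").getD []
  let B := (PySem.Str.split? b " ").getD []
  pvGo (A.drop 1) (B.drop 1) (if B.headD "" < A.headD "" then 1 else -1)

-- ===== PRECONDITION & SPEC =====
def Spec_compare_2_lists (a : String) (b : String) (out : Int) : Prop := out = compare_2_lists_alt a b
instance (a : String) (b : String) (out : Int) : Decidable (Spec_compare_2_lists a b out) := by unfold Spec_compare_2_lists; infer_instance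

-- ===== CLAIM (what is proved, stated in full; the proofs are below) =====
def Claim_equal_compare_2_lists : Prop := ∀ (a : String) (b : String), Dom_compare_2_lists a b → Spec_compare_2_lists a b (compare_2_lists a b)

-- ===== LEMMAS AND PROOFS =====

-- the two loop bodies only differ in test order; by trichotomy they compute the same value
theorem pvScanLT_eq (xs ys : List String) : pvScanLT xs ys = pvScanGT xs ys := by
  induction xs generalizing ys with
  | nil => cases ys <;> simp [pvScanLT, pvScanGT]
  | cons x xs ih =>
    cases ys with
    | nil => simp [pvScanLT, pvScanGT]
    | cons y ys =>
      simp only [pvScanLT, pvScanGT]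
      rcases lt_trichotomy x y with h | h | h
      · simp [h, lt_asymm h]
      · simp [h, ih]
      · simp [h, lt_asymm h]

-- Source B's recursion, characterised by A's scan value and the length comparison
theorem pvGo_eq (xs ys : List String) (tie : Int) :
    pvGo xs ys tie =
      if xs.length = ys.length then (if pvScanGT xs ys = 0 then tie else pvScanGT xs ys)
      else if ys.length < xs.length then (if pvScanGT xs ys = 0 then 1 else pvScanGT xs ys)
      else (if pvScanGT xs ys = 0 then -1 else pvScanGT xs ys) := by
  induction xs generalizing ys with
  | nil =>
    cases ys with
    | nil => simp [pvGo, pvScanGT]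
    | cons y ys => simp [pvGo, pvScanGT]
  | cons x xs ih =>
    cases ys with
    | nil => simp [pvGo, pvScanGT]
    | cons y ys =>
      simp only [pvGo, pvScanGT, List.length_cons]
      rcases lt_trichotomy x y with h | h | h
      · have hne : x ≠ y := ne_of_lt h
        simp [hne, lt_asymm h, h]
      · subst h
        have : ¬ (x ≠ x) := by simp
        simp only [this, if_false, lt_irrefl]
        rw [ih ys]
        have h2 : (ys.length + 1 < xs.length + 1) ↔ (ys.length < xs.length) := by omega
        by_cases he : xs.length = ys.length
        · simp [he]
        · simp [he, h2]
      · have hne : x ≠ y := (ne_of_lt h).symm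
        simp [hne, h]

-- every terminating branch of splitOn.go conses onto the accumulator before reversing
theorem pvGoSplit_ne_nil (sep : List Char) (fuel : Nat) (l cur : List Char)
    (acc : List (List Char)) : PySem.Chars.splitOn.go sep fuel l cur acc ≠ [] := by
  induction fuel generalizing l cur acc with
  | zero => simp [PySem.Chars.splitOn.go]
  | succ n ih =>
    cases l with
    | nil => simp [PySem.Chars.splitOn.go]
    | cons c rest =>
      rw [PySem.Chars.splitOn.go]
      split
      · exact ih _ _ _
      · exact ih _ _ _

-- a Python '.split(sep)' result (sep ≠ '') is never empty
theorem split_getD_ne_nil (s : String) : ((PySem.Str.split? s " ").getD []).length ≠ 0 := by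
  simp only [PySem.Str.split?, PySem.Chars.split?, PySem.Chars.splitOn]
  simp only [List.isEmpty_iff]
  rw [if_neg (by simp)]
  simp only [Option.map_some, Option.getD_some, List.length_map, ne_eq,
    List.length_eq_zero_iff]
  exact pvGoSplit_ne_nil _ _ _ _ _

-- the core equivalence over the two split word lists (both non-empty)
theorem pvCore (L1 L2 : List String) (h1 : L1.length ≠ 0) (h2 : L2.length ≠ 0) :
    (if L1.length = L2.length then
       (if pvScanGT (L1.drop 1) (L2.drop 1) = 0 then
          (if L2.headD "" < L1.headD "" then (1 : Int) else -1)
        else pvScanGT (L1.drop 1) (L2.drop 1))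
     else if L2.length < L1.length then
       (if pvScanGT (L1.drop 1) (L2.drop 1) = 0 then 1 else pvScanGT (L1.drop 1) (L2.drop 1))
     else
       (if pvScanLT (L1.drop 1) (L2.drop 1) = 0 then -1 else pvScanLT (L1.drop 1) (L2.drop 1)))
    = pvGo (L1.drop 1) (L2.drop 1) (if L2.headD "" < L1.headD "" then 1 else -1) := by
  rw [pvScanLT_eq, pvGo_eq]
  have hd1 : (L1.drop 1).length = L1.length - 1 := by simp
  have hd2 : (L2.drop 1).length = L2.length - 1 := by simp
  by_cases he : L1.length = L2.length
  · rw [if_pos he, if_pos (show (L1.drop 1).length = (L2.drop 1).length by omega)]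
  · rw [if_neg he, if_neg (show ¬ (L1.drop 1).length = (L2.drop 1).length by omega)]
    by_cases hlt : L2.length < L1.length
    · rw [if_pos hlt, if_pos (show (L2.drop 1).length < (L1.drop 1).length by omega)]
    · rw [if_neg hlt, if_neg (show ¬ (L2.drop 1).length < (L1.drop 1).length by omega)]

-- ===== VERDICT (by name: the statement is the Claim_ definition above) =====
theorem compare_2_lists_spec : Claim_equal_compare_2_lists := by
  intro a b _
  unfold Spec_compare_2_lists compare_2_lists compare_2_lists_alt
  exact pvCore _ _ (split_getD_ne_nil a) (split_getD_ne_nil b)
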